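-- pv_equiv track=rewrite | github.com/dannyX21/hanoi-qlearning | hanoi_towers_qlearning.py | letter2State
-- ===== SOURCE A (Python) =====
-- def letter2State(letters):
--     A=B=C=""
--     n = len(letters)
--     c=1
--     for l in letters:
--         if l == "A":
--             A+=str(c)
--         elif l =="B":
--             B+=str(c)
--         elif l =="C":
--             C+=str(c)
--         c+=1
--     A=A.rjust(n,"-")
--     B=B.rjust(n,"-")
--     C=C.rjust(n,"-")
--     return [A,B,C]
-- ===== SOURCE B (Python) =====
-- def letter2State(letters):
--     n = len(letters)
--     return ["".join(str(i) for i, l in enumerate(letters, 1) if l == t).rjust(n, "-")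
--             for t in "ABC"]
-- ===== Notes on version B (the rewrite author's own statement) =====
-- stated objective: simpler
-- what changed: Replaces the single pass that fills three string accumulators with three independent filtering scans: for each tower letter, join the positions where it occurs and right-justify.
import Mathlib
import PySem

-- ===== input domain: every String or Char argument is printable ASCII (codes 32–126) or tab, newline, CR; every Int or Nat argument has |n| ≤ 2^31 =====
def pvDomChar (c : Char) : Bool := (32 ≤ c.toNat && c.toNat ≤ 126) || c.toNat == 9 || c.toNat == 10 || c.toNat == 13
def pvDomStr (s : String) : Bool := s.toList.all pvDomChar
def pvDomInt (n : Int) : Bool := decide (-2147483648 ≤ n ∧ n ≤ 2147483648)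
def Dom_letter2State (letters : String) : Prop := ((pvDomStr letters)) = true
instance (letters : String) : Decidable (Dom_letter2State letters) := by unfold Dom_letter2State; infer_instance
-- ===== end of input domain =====

-- B computes each tower with its own filtering scan over enumerate instead of one pass filling three accumulators; objective: simpler.


-- ===== PORT A =====
-- s.rjust(n, "-") on the char-list side (exact for single-char fill)
def pvRjust (cs : List Char) (n : Nat) : List Char :=
  List.replicate (n - cs.length) '-' ++ cs

def letter2State (letters : String) : List String :=
  let n := letters.toList.length
  let st := letters.toList.foldl
    (fun (st : List Char × List Char × List Char × Int) l =>
      let A := st.1; let B := st.2.1; let C := st.2.2.1; let c := st.2.2.2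
      if l = 'A' then (A ++ PySem.Int.toChars c, B, C, c + 1)
      else if l = 'B' then (A, B ++ PySem.Int.toChars c, C, c + 1)
      else if l = 'C' then (A, B, C ++ PySem.Int.toChars c, c + 1)
      else (A, B, C, c + 1))
    ([], [], [], 1)
  [String.ofList (pvRjust st.1 n), String.ofList (pvRjust st.2.1 n), String.ofList (pvRjust st.2.2.1 n)]

-- ===== PORT B =====
-- "".join(str(i) for i, l in enumerate(letters, 1) if l == t)
def pvTower (letters : List Char) (t : Char) : List Char :=
  PySem.Chars.join []
    (((PySem.List.enumerate letters 1).filter (fun p => p.2 == t)).map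
      (fun p => PySem.Int.toChars p.1))

def letter2State_alt (letters : String) : List String :=
  let n := letters.toList.length
  ['A', 'B', 'C'].map (fun t => String.ofList (pvRjust (pvTower letters.toList t) n))

-- ===== PRECONDITION & SPEC =====
def Spec_letter2State (letters : String) (out : List String) : Prop := out = letter2State_alt letters
instance (letters : String) (out : List String) : Decidable (Spec_letter2State letters out) := by unfold Spec_letter2State; infer_instance

-- ===== CLAIM (what is proved, stated in full; the proofs are below) =====
def Claim_equal_letter2State : Prop := ∀ (letters : String), Dom_letter2State letters → Spec_letter2State letters (letter2State letters)

-- ===== LEMMAS AND PROOFS =====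
theorem join_nil_cons (x : List Char) (xs : List (List Char)) :
    PySem.Chars.join [] (x :: xs) = x ++ PySem.Chars.join [] xs := by
  cases xs with
  | nil => simp [PySem.Chars.join_singleton, PySem.Chars.join_nil]
  | cons y ys => rw [PySem.Chars.join_cons_cons]; simp

theorem pvTower_cons (l : Char) (cs : List Char) (c : Int) (t : Char) :
    PySem.Chars.join []
      (((PySem.List.enumerate (l :: cs) c).filter (fun p => p.2 == t)).map
        (fun p => PySem.Int.toChars p.1)) =
    (if l = t then PySem.Int.toChars c else []) ++
    PySem.Chars.join []
      (((PySem.List.enumerate cs (c + 1)).filter (fun p => p.2 == t)).map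
        (fun p => PySem.Int.toChars p.1)) := by
  rw [PySem.List.enumerate_cons]
  by_cases h : l = t
  · simp [h, join_nil_cons]
  · simp [h]

theorem fold_eq (cs : List Char) (c : Int) (A B C : List Char) :
    cs.foldl
      (fun (st : List Char × List Char × List Char × Int) l =>
        let A := st.1; let B := st.2.1; let C := st.2.2.1; let c := st.2.2.2
        if l = 'A' then (A ++ PySem.Int.toChars c, B, C, c + 1)
        else if l = 'B' then (A, B ++ PySem.Int.toChars c, C, c + 1)
        else if l = 'C' then (A, B, C ++ PySem.Int.toChars c, c + 1)
        else (A, B, C, c + 1))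
      (A, B, C, c) =
    (A ++ PySem.Chars.join [] (((PySem.List.enumerate cs c).filter (fun p => p.2 == 'A')).map (fun p => PySem.Int.toChars p.1)),
     B ++ PySem.Chars.join [] (((PySem.List.enumerate cs c).filter (fun p => p.2 == 'B')).map (fun p => PySem.Int.toChars p.1)),
     C ++ PySem.Chars.join [] (((PySem.List.enumerate cs c).filter (fun p => p.2 == 'C')).map (fun p => PySem.Int.toChars p.1)),
     c + cs.length) := by
  induction cs generalizing c A B C with
  | nil => simp [PySem.List.enumerate_nil, PySem.Chars.join_nil]
  | cons l cs ih =>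
    simp only [List.foldl_cons, List.length_cons]
    rw [pvTower_cons, pvTower_cons, pvTower_cons]
    by_cases hA : l = 'A'
    · simp [hA, ih]; omega
    · by_cases hB : l = 'B'
      · simp [hB, ih]; omega
      · by_cases hC : l = 'C'
        · simp [hC, ih]; omega
        · simp [hA, hB, hC, ih]; omega

-- ===== VERDICT (by name: the statement is the Claim_ definition above) =====
theorem letter2State_spec : Claim_equal_letter2State := by
  intro letters _
  unfold Spec_letter2State letter2State letter2State_alt pvTower
  simp only [List.map_cons, List.map_nil]
  rw [fold_eq]; simp
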